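-- pv_equiv track=rewrite | github.com/JeiKeiLim/TIL | coding_test/leetcode/1065_IndexPairsofaString .py | indexPairs3
-- ===== SOURCE A (Python) =====
-- def indexPairs3(text, words):
-- 	result = []
--
-- 	for i in range(len(text)):
-- 		for w in words:
-- 			e_idx = len(w) + i
-- 			if e_idx <= len(text) and text[i:e_idx] == w:
-- 				result.append([i, e_idx-1])
--
-- 	result.sort()
-- 	return result
-- ===== SOURCE B (Python) =====
-- def indexPairs3(text, words):
-- 	n = len(text)
-- 	pairs = []
-- 	for w in words:
-- 		start = text.find(w)
-- 		while 0 <= start < n: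
-- 			pairs.append([start, start + len(w) - 1])
-- 			start = text.find(w, start + 1)
-- 	pairs.sort()
-- 	return pairs
-- ===== Notes on version B (the rewrite author's own statement) =====
-- stated objective: faster
-- what changed: A scans every start index and, for each, slices the text against every word; B instead loops once per word, jumping between its occurrences with repeated str.find (C-level substring search), then sorts the collected pairs exactly as A does.
import Mathlib
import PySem

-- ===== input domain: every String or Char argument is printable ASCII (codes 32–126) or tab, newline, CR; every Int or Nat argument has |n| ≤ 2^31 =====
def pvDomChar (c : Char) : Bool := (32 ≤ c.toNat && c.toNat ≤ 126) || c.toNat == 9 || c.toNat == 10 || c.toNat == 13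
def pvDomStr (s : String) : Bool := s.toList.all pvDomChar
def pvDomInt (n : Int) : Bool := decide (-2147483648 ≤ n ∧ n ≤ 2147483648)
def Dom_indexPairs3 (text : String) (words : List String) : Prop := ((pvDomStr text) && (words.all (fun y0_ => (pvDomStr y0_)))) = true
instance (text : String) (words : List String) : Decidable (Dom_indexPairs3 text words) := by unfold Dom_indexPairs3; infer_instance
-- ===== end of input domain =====

-- B replaces A's per-index scan over all words by a per-word `str.find` loop that jumps
-- between occurrences; the collected pairs are then sorted exactly as A sorts them.


-- ===== PORT A =====
-- literal transliteration of A: for each i in range(len(text)), for each w in words,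
-- append [i, e_idx-1] if e_idx <= len(text) and text[i:e_idx] == w; then result.sort()
def indexPairs3 (text : String) (words : List String) : List (List Int) :=
  let t := text.toList
  let result : List (List Int) :=
    (PySem.List.pyRange 0 (t.length : Int) 1).foldl (fun result i =>
      words.foldl (fun result w =>
        let e_idx : Int := (w.toList.length : Int) + i
        if e_idx ≤ (t.length : Int) ∧ PySem.List.slice t (some i) (some e_idx) = w.toList
        then result ++ [[i, e_idx - 1]] else result) result) []
  PySem.List.sorted result (fun x => x) false

-- ===== PORT B =====
-- the `while 0 <= start < n: append; start = text.find(w, start+1)` loop of Source B;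
-- `fuel` bounds the iteration count (start strictly increases, so n iterations suffice)
def altCollect (t w : List Char) (n : Nat) : Nat → Int → List (List Int)
  | 0, _ => []
  | fuel + 1, start =>
      if 0 ≤ start ∧ start < (n : Int) then
        [start, start + (w.length : Int) - 1] ::
          altCollect t w n fuel (PySem.Chars.findFrom t w (start + 1) none)
      else []

def indexPairs3_alt (text : String) (words : List String) : List (List Int) :=
  let t := text.toList
  let n := t.length
  let pairs : List (List Int) := words.foldl (fun pairs w =>
    pairs ++ altCollect t w.toList n n (PySem.Chars.find t w.toList)) []
  PySem.List.sorted pairs (fun x => x) false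

-- ===== PRECONDITION & SPEC =====
def Spec_indexPairs3 (text : String) (words : List String) (out : List (List Int)) : Prop := out = indexPairs3_alt text words
instance (text : String) (words : List String) (out : List (List Int)) : Decidable (Spec_indexPairs3 text words out) := by unfold Spec_indexPairs3; infer_instance

-- ===== CLAIM (what is proved, stated in full; the proofs are below) =====
def Claim_equal_indexPairs3 : Prop := ∀ (text : String) (words : List String), Dom_indexPairs3 text words → Spec_indexPairs3 text words (indexPairs3 text words)

-- ===== LEMMAS AND PROOFS =====

-- (l.filter p).map f written as a flatMap
lemma filter_map_eq_flatMap {α β : Type} (p : α → Bool) (f : α → β) (l : List α) :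
    (l.filter p).map f = l.flatMap (fun x => if p x then [f x] else []) := by
  induction l with
  | nil => rfl
  | cons a l ih => by_cases h : p a <;> simp [h, ih]

-- transposing a double flatMap is a permutation
lemma flatMap_comm_perm {α β γ : Type} (as : List α) (bs : List β) (f : α → β → List γ) :
    (as.flatMap fun a => bs.flatMap (f a)).Perm (bs.flatMap fun b => as.flatMap fun a => f a b) := by
  induction as with
  | nil => simp
  | cons a as ih =>
      simp only [List.flatMap_cons]
      exact ((ih.append_left _).trans (List.flatMap_append_perm bs (f a) _))

-- A's match test at position i is "w is a prefix of t.drop i"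
lemma matchA_iff (t w : List Char) (i : Nat) (hi : i ≤ t.length) :
    ((w.length : Int) + (i : Int) ≤ (t.length : Int) ∧
        PySem.List.slice t (some (i : Int)) (some ((w.length : Int) + (i : Int))) = w)
      ↔ w <+: t.drop i := by
  rw [show (w.length : Int) + (i : Int) = (i : Int) + (w.length : Int) by ring,
      PySem.List.slice_natCast_add]
  constructor
  · rintro ⟨hle, htake⟩
    exact List.prefix_iff_eq_take.mpr htake.symm
  · intro h
    have hlen := h.length_le
    rw [List.length_drop] at hlen
    refine ⟨by omega, ?_⟩
    rw [List.prefix_iff_eq_take] at h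
    rw [← h]
  
-- w occurring at some i ≥ k means w is an infix of t.drop k
lemma infix_drop_of_prefix_drop (t w : List Char) (k i : Nat) (hki : k ≤ i)
    (h : w <+: t.drop i) : w <:+: t.drop k := by
  have : t.drop i = (t.drop k).drop (i - k) := by
    rw [List.drop_drop]
    congr 1
    omega
  rw [this] at h
  exact h.isInfix.trans (List.drop_suffix (i - k) (t.drop k)).isInfix

-- the find/while loop collects exactly the match positions ≥ k, in increasing order
lemma altCollect_spec (t w : List Char) :
    ∀ (m k fuel : Nat), t.length - k = m → k ≤ t.length → t.length - k ≤ fuel →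
    altCollect t w t.length fuel (PySem.Chars.findFrom t w (k : Int) none)
      = ((List.range' k (t.length - k)).filter (fun i => decide (w <+: t.drop i))).map
          (fun (i : Nat) => [(i : Int), (i : Int) + (w.length : Int) - 1]) := by
  intro m
  induction m using Nat.strong_induction_on with
  | _ m ih =>
    intro k fuel hm hk hfuel
    by_cases hj : PySem.Chars.findFrom t w (k : Int) none = -1
    · -- no occurrence at or after k: the loop exits at once and the filter is empty
      have hempty : (List.range' k (t.length - k)).filter (fun i => decide (w <+: t.drop i)) = [] := by
        rw [List.filter_eq_nil_iff]
        intro i hi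
        simp only [decide_eq_true_eq]
        intro hocc
        rw [List.mem_range'] at hi
        obtain ⟨d, hd, rfl⟩ := hi
        exact (PySem.Chars.findFrom_natCast_eq_neg_one_iff t w k hk).mp hj
          (infix_drop_of_prefix_drop t w k _ (by omega) hocc)
      rw [hempty]
      cases fuel with
      | zero => rfl
      | succ f => simp [altCollect, hj]
    · obtain ⟨hkj, hpre, hmin⟩ := PySem.Chars.findFrom_natCast_spec t w k hk hj
      set j : Int := PySem.Chars.findFrom t w (k : Int) none with hjdef
      have hj0 : 0 ≤ j := le_trans (by positivity) hkj
      have hjnat : j = (j.toNat : Int) := (Int.toNat_of_nonneg hj0).symm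
      by_cases hjn : j < (t.length : Int)
      · -- occurrence j found inside the text: one loop iteration, then recurse from j+1
        have hkj' : k ≤ j.toNat := by omega
        have hjn' : j.toNat < t.length := by omega
        cases fuel with
        | zero => omega
        | succ f =>
          have hstep : altCollect t w t.length (f + 1) j
              = [j, j + (w.length : Int) - 1] ::
                altCollect t w t.length f (PySem.Chars.findFrom t w (j + 1) none) := by
            simp [altCollect, hj0, hjn]
          rw [hstep]
          have hj1 : j + 1 = ((j.toNat + 1 : Nat) : Int) := by omega
          have hdec : t.length - (j.toNat + 1) < m := by omega
          have hk1 : j.toNat + 1 ≤ t.length := by omega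
          have hf1 : t.length - (j.toNat + 1) ≤ f := by omega
          rw [hj1, ih (t.length - (j.toNat + 1)) hdec (j.toNat + 1) f rfl hk1 hf1]
          -- split the index range at j.toNat
          have hsplit : List.range' k (t.length - k)
              = List.range' k (j.toNat - k) ++ j.toNat :: List.range' (j.toNat + 1) (t.length - (j.toNat + 1)) := by
            have h1 : List.range' k (j.toNat - k) ++ List.range' (k + 1 * (j.toNat - k)) (t.length - j.toNat) 1
                = List.range' k ((j.toNat - k) + (t.length - j.toNat)) := List.range'_append
            have h2 : k + 1 * (j.toNat - k) = j.toNat := by omega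
            have h3 : (j.toNat - k) + (t.length - j.toNat) = t.length - k := by omega
            rw [h2, h3] at h1
            rw [← h1]
            congr 1
            rw [show t.length - j.toNat = (t.length - (j.toNat + 1)) + 1 by omega, List.range'_succ]
          rw [hsplit]
          have hnone : (List.range' k (j.toNat - k)).filter (fun i => decide (w <+: t.drop i)) = [] := by
            rw [List.filter_eq_nil_iff]
            intro i hi
            simp only [decide_eq_true_eq]
            rw [List.mem_range'] at hi
            obtain ⟨d, hd, rfl⟩ := hi
            exact hmin (k + 1 * d) (by omega) (by omega)
          have hyes : decide (w <+: t.drop j.toNat) = true := by simpa using hpre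
          simp only [List.filter_append, hnone, List.filter_cons, hyes, List.nil_append, if_true, List.map_cons, List.cons.injEq]
          refine ⟨⟨hjnat, ?_, trivial⟩, trivial⟩
          omega
      · -- the found index is at the end of the text (only for w = ""): loop exits, filter empty
        have hempty : (List.range' k (t.length - k)).filter (fun i => decide (w <+: t.drop i)) = [] := by
          rw [List.filter_eq_nil_iff]
          intro i hi
          simp only [decide_eq_true_eq]
          rw [List.mem_range'] at hi
          obtain ⟨d, hd, rfl⟩ := hi
          exact hmin (k + 1 * d) (by omega) (by omega)
        rw [hempty]
        cases fuel with
        | zero => rfl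
        | succ f => simp [altCollect, hjn]

-- sorting is invariant under permutation of the input (identity key)
lemma sorted_perm_eq (xs ys : List (List Int)) (h : xs.Perm ys) :
    PySem.List.sorted xs (fun x => x) false = PySem.List.sorted ys (fun x => x) false := by
  have h2 := PySem.List.sorted_eq_sorted_of_perm xs ys (fun a => a) (fun a b h => h) h
  convert h2 using 2

-- ===== VERDICT (by name: the statement is the Claim_ definition above) =====
theorem indexPairs3_spec : Claim_equal_indexPairs3 := by
  intro text words _
  unfold Spec_indexPairs3 indexPairs3 indexPairs3_alt
  dsimp only
  set t := text.toList with ht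
  -- A's unsorted result, as a flatMap over positions
  have hA : (PySem.List.pyRange 0 (t.length : Int) 1).foldl (fun result i =>
        words.foldl (fun result w =>
          let e_idx : Int := (w.toList.length : Int) + i
          if e_idx ≤ (t.length : Int) ∧ PySem.List.slice t (some i) (some e_idx) = w.toList
          then result ++ [[i, e_idx - 1]] else result) result) []
      = (List.range t.length).flatMap (fun (i : Nat) => words.flatMap (fun w =>
          if w.toList <+: t.drop i
          then [[(i : Int), (i : Int) + (w.toList.length : Int) - 1]] else [])) := by
    simp only [PySem.List.foldl_append_ite (p := fun w => _ ∧ _)]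
    rw [PySem.List.foldl_append_eq_flatMap, List.nil_append,
        PySem.List.pyRange_zero_natCast, List.flatMap_map]
    apply List.flatMap_congr
    intro i hi
    rw [List.mem_range] at hi
    rw [filter_map_eq_flatMap]
    apply List.flatMap_congr
    intro w _
    simp only [decide_eq_true_eq]
    rw [show (w.toList.length : Int) + (i : Int) - 1 = (i : Int) + (w.toList.length : Int) - 1 by ring]
    by_cases h : w.toList <+: t.drop i
    · rw [if_pos ((matchA_iff t w.toList i (by omega)).mpr h), if_pos h]
    · rw [if_neg (by
        intro hc
        exact h ((matchA_iff t w.toList i (by omega)).mp (by simpa using hc))), if_neg h]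
  -- B's unsorted result, as a flatMap over words
  have hB : words.foldl (fun pairs w =>
        pairs ++ altCollect t w.toList t.length t.length (PySem.Chars.find t w.toList)) []
      = words.flatMap (fun w => (List.range t.length).flatMap (fun (i : Nat) =>
          if w.toList <+: t.drop i
          then [[(i : Int), (i : Int) + (w.toList.length : Int) - 1]] else [])) := by
    rw [PySem.List.foldl_append_eq_flatMap, List.nil_append]
    apply List.flatMap_congr
    intro w _
    rw [← PySem.Chars.findFrom_zero t w.toList, show (0 : Int) = ((0 : Nat) : Int) by simp,
        altCollect_spec t w.toList (t.length - 0) 0 t.length rfl (by omega) (by omega)]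
    rw [Nat.sub_zero, ← List.range_eq_range', filter_map_eq_flatMap]
    apply List.flatMap_congr
    intro i _
    by_cases h : w.toList <+: t.drop i <;> simp [h]
  rw [hA, hB]
  exact sorted_perm_eq _ _ (flatMap_comm_perm _ _ _)
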